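-- pv_equiv track=rewrite | github.com/carozziandrea/AdventOfCode2025 | Day02/day02.py | isValidID
-- ===== SOURCE A (Python) =====
-- def isValidID(id):
--     l = 0
--     r = 1
--     s = 1
--     repeated = False
--     curSequence = id[l:r]
--     while (s < len(id)):
--         candidate = id[s:s+len(curSequence)]
--         if curSequence == candidate:
--             s += len(curSequence)
--             repeated = True
--         else:
--             r += 1
--             curSequence = id[l:r]
--             s = r
--             repeated = False
--
--     return repeated
-- ===== SOURCE B (Python) =====
-- def isValidID(id):
--     n = len(id)
--     for d in range(1, n // 2 + 1):
--         if n % d == 0 and id[:d] * (n // d) == id: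
--             return True
--     return False
-- ===== Notes on version B (the rewrite author's own statement) =====
-- stated objective: faster
-- what changed: A grows a candidate prefix one character at a time and rescans the string block-by-block for every length (copying a slice per block); B only tests the proper divisors d of len(id) and compares id[:d] * (len(id)//d) against id in one pass per divisor.
import Mathlib
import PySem

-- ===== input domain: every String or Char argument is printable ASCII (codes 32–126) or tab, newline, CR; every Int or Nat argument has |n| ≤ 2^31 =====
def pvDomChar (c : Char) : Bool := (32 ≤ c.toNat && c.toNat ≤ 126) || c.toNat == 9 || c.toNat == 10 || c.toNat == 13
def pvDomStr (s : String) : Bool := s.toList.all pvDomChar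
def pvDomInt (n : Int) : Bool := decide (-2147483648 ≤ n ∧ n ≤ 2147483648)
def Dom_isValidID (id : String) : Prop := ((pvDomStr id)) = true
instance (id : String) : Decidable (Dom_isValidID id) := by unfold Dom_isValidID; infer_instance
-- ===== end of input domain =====

-- B replaces A's grow-the-prefix rescanning loop by a direct check of the proper
-- divisors d of len(id): id is valid iff some prefix of divisor length tiles id.

-- ===== PORT A =====
-- A's while loop; l stays 0 throughout, so id[l:r] = id.take r, and id[s:s+len(cur)]
-- (all indices ≥ 0; Python slices clamp exactly like take/drop does) is
-- (id.drop s).take curSequence.length. The two Prop arguments only justify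
-- termination; they carry no data and the computation is exactly A's.
def isValidIDLoop (id : List Char) (r s : Nat) (repeated : Bool) (curSequence : List Char)
    (hc : 1 ≤ curSequence.length) (hrs : r ≤ s) : Bool :=
  if h : s < id.length then
    let candidate := (id.drop s).take curSequence.length
    if curSequence = candidate then
      isValidIDLoop id r (s + curSequence.length) true curSequence hc (by omega)
    else
      isValidIDLoop id (r + 1) (r + 1) false (id.take (r + 1))
        (by simp [List.length_take]; omega) (le_refl _)
  else repeated
termination_by (id.length + 1 - r, id.length - s)
decreasing_by
  · exact Prod.Lex.right _ (by omega)
  · exact Prod.Lex.left _ _ (by omega)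

def isValidID (id : String) : Bool :=
  let cs := id.toList
  -- Python: l = 0; r = 1; s = 1; repeated = False; curSequence = id[0:1]; while s < len(id).
  -- On the empty string the while body never runs and repeated = False is returned.
  if h : cs.length = 0 then false
  else isValidIDLoop cs 1 1 false (cs.take 1) (by simp [List.length_take]; omega) (le_refl 1)

-- ===== PORT B =====
-- Source B: for d in range(1, n // 2 + 1): if n % d == 0 and id[:d] * (n // d) == id: return True
-- range(1, n//2 + 1) over nonnegative ints is List.range' 1 (n/2);
-- id[:d] * (n//d) is (List.replicate (n/d) (l.take d)).flatten.
def isValidID_alt (id : String) : Bool :=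
  let l := id.toList
  let n := l.length
  (List.range' 1 (n / 2)).any
    (fun d => decide (n % d = 0) && decide ((List.replicate (n / d) (l.take d)).flatten = l))

-- ===== PRECONDITION & SPEC =====
def Spec_isValidID (id : String) (out : Bool) : Prop := out = isValidID_alt id
instance (id : String) (out : Bool) : Decidable (Spec_isValidID id out) := by unfold Spec_isValidID; infer_instance

-- ===== CLAIM (what is proved, stated in full; the proofs are below) =====
def Claim_equal_isValidID : Prop := ∀ (id : String), Dom_isValidID id → Spec_isValidID id (isValidID id)

-- ===== LEMMAS AND PROOFS =====

-- common characterisation: k ≥ 1 divides n = |id|, and the k-prefix tiles id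
def Tiles (id : List Char) (k : Nat) : Prop :=
  k ∣ id.length ∧ id = (List.replicate (id.length / k) (id.take k)).flatten

lemma drop_flatten_replicate {α : Type} (p : List α) (m q : Nat) :
    (List.flatten (List.replicate m p)).drop (q * p.length)
      = List.flatten (List.replicate (m - q) p) := by
  induction q generalizing m with
  | zero => simp
  | succ q ih =>
    cases m with
    | zero => simp
    | succ m =>
      have h : (q + 1) * p.length = p.length + q * p.length := by ring
      rw [h, List.replicate_succ, List.flatten_cons, ← List.drop_drop, List.drop_left, ih]
      simp

lemma block_eq_of_tiles (id : List Char) (k s : Nat) (hk : 1 ≤ k) (hks : k ∣ s)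
    (hsn : s + k ≤ id.length) (ht : Tiles id k) :
    (id.drop s).take k = id.take k := by
  obtain ⟨hdvd, heq⟩ := ht
  have hkn : k ≤ id.length := by omega
  have hplen : (id.take k).length = k := by simp [List.length_take]; omega
  obtain ⟨q, hq⟩ := hks
  obtain ⟨m, hm⟩ := hdvd
  have hdivkm : id.length / k = m := by rw [hm]; exact Nat.mul_div_cancel_left m (by omega)
  have hqm : q + 1 ≤ m := by
    have hexp : k * (q + 1) = k * q + k := by ring
    have hle : k * (q + 1) ≤ k * m := by omega
    exact Nat.le_of_mul_le_mul_left hle (by omega)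
  have hfr := drop_flatten_replicate (id.take k) (id.length / k) q
  rw [hplen] at hfr
  have hdrop : id.drop s = List.flatten (List.replicate (id.length / k - q) (id.take k)) := by
    conv_lhs => rw [heq]
    rw [hq, Nat.mul_comm k q] at *
    exact hfr
  rw [hdrop]
  have hsplit : id.length / k - q = (id.length / k - q - 1) + 1 := by omega
  rw [hsplit, List.replicate_succ, List.flatten_cons, List.take_left' hplen]

lemma loop_spec (id : List Char) (r s : Nat) (hr : 1 ≤ r) (hdvd : r ∣ s)
    (hsn : s ≤ id.length)
    (hper : id.take s = List.flatten (List.replicate (s / r) (id.take r)))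
    (hc : 1 ≤ (id.take r).length) (hrs : r ≤ s) :
    (isValidIDLoop id r s (decide (r < s)) (id.take r) hc hrs = true)
      ↔ (∃ k, r ≤ k ∧ k < id.length ∧ Tiles id k) := by
  rw [isValidIDLoop]
  by_cases h : s < id.length
  · simp only [h, dif_pos]
    have hrn : r ≤ id.length := by omega
    have hlen : (id.take r).length = r := by simp [List.length_take]; omega
    by_cases hm : id.take r = (id.drop s).take (id.take r).length
    · -- match branch
      rw [if_pos hm]
      have hcand : (id.drop s).take r = id.take r := by rw [hlen] at hm; exact hm.symm
      have hfit : s + r ≤ id.length := by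
        have := congrArg List.length hcand
        simp [List.length_take, List.length_drop] at this
        omega
      have hbtrue : (true : Bool) = decide (r < s + (id.take r).length) := by
        rw [hlen]; simp; omega
      conv_lhs => lhs; rw [hbtrue]
      have hper' : id.take (s + (id.take r).length)
          = List.flatten (List.replicate ((s + (id.take r).length) / r) (id.take r)) := by
        rw [hlen, List.take_add, hper, hcand, Nat.add_div_right s (by omega),
          List.replicate_succ', List.flatten_append]
        simp
      exact loop_spec id r (s + (id.take r).length) hr
        (by rw [hlen]; exact Nat.dvd_add hdvd (dvd_refl r))
        (by rw [hlen]; omega) hper' hc (by omega)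
    · -- mismatch branch
      rw [if_neg hm]
      have hbfalse : (false : Bool) = decide (r + 1 < r + 1) := by simp
      rw [hbfalse]
      have hper'' : id.take (r + 1)
          = List.flatten (List.replicate ((r + 1) / (r + 1)) (id.take (r + 1))) := by
        rw [Nat.div_self (by omega)]; simp
      rw [loop_spec id (r + 1) (r + 1) (by omega) (dvd_refl _) (by omega) hper''
        (by simp [List.length_take]; omega) (le_refl _)]
      constructor
      · rintro ⟨k, hk1, hk2, hk3⟩; exact ⟨k, by omega, hk2, hk3⟩
      · rintro ⟨k, hk1, hk2, hk3⟩
        refine ⟨k, ?_, hk2, hk3⟩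
        rcases Nat.eq_or_lt_of_le hk1 with heq | hlt
        · exfalso
          subst heq
          obtain ⟨q, hq⟩ := hdvd
          obtain ⟨m, hmm⟩ := hk3.1
          have hqm : q + 1 ≤ m := by
            have hqlt : q < m := Nat.lt_of_mul_lt_mul_left (a := r) (by omega)
            omega
          have hfit : s + r ≤ id.length := by
            have hle2 : r * (q + 1) ≤ r * m := Nat.mul_le_mul_left r hqm
            have hexp : r * (q + 1) = r * q + r := by ring
            omega
          have hblk := block_eq_of_tiles id r s hr ⟨q, hq⟩ hfit hk3
          rw [hlen] at hm
          exact hm hblk.symm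
        · omega
  · simp only [h]
    have hs : s = id.length := by omega
    constructor
    · intro hd
      have hrs' : r < s := by simpa using hd
      refine ⟨r, le_refl r, by omega, ⟨hs ▸ hdvd, ?_⟩⟩
      rw [← hs]
      conv_lhs => rw [← List.take_length (l := id)]
      rw [← hs, hper]
    · rintro ⟨k, hk1, hk2, _⟩
      simp; omega
termination_by (id.length + 1 - r, id.length - s)
decreasing_by
  all_goals first
    | exact Prod.Lex.right _ (by omega)
    | exact Prod.Lex.left _ _ (by omega)

lemma portA_iff (id : String) :
    (isValidID id = true) ↔ (∃ k, 1 ≤ k ∧ k < id.toList.length ∧ Tiles id.toList k) := by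
  unfold isValidID
  by_cases h : id.toList.length = 0
  · simp only [h, dif_pos]
    constructor
    · intro hfalse; exact absurd hfalse (by simp)
    · rintro ⟨k, hk1, hk2, _⟩; omega
  · simp only [h]
    have hbool : (false : Bool) = decide (1 < 1) := by simp
    rw [hbool]
    exact loop_spec id.toList 1 1 (le_refl 1) (dvd_refl 1) (Nat.one_le_iff_ne_zero.mpr h)
      (by simp) (by rw [List.length_take]; omega) (le_refl 1)

lemma portB_iff (id : String) :
    (isValidID_alt id = true) ↔ (∃ k, 1 ≤ k ∧ k < id.toList.length ∧ Tiles id.toList k) := by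
  unfold isValidID_alt
  simp only [List.any_eq_true, List.mem_range'_1, Bool.and_eq_true, decide_eq_true_eq]
  constructor
  · rintro ⟨d, ⟨hd1, hd2⟩, hmod, heq⟩
    refine ⟨d, hd1, ?_, Nat.dvd_of_mod_eq_zero hmod, heq.symm⟩
    omega
  · rintro ⟨k, hk1, hk2, hkdvd, heq⟩
    have hmod := Nat.mod_eq_zero_of_dvd hkdvd
    obtain ⟨m, hm⟩ := hkdvd
    have hm2 : 2 ≤ m := by
      rcases m with _ | _ | m
      · rw [Nat.mul_zero] at hm; omega
      · rw [Nat.mul_one] at hm; omega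
      · omega
    have hk2n : k * 2 ≤ id.toList.length := by
      calc k * 2 ≤ k * m := Nat.mul_le_mul_left k hm2
      _ = id.toList.length := hm.symm
    have hhalf : k ≤ id.toList.length / 2 := (Nat.le_div_iff_mul_le (by omega)).mpr hk2n
    exact ⟨k, ⟨hk1, by omega⟩, hmod, heq.symm⟩

-- ===== VERDICT (by name: the statement is the Claim_ definition above) =====
theorem isValidID_spec : Claim_equal_isValidID := by
  intro id _
  unfold Spec_isValidID
  rw [Bool.eq_iff_iff, portA_iff, portB_iff]
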